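-- pv_equiv track=rewrite | github.com/kulikovanna/python_lab1 | task1.py | sum_of_divisors_with_conditions
-- ===== SOURCE A (Python) =====
-- from math import gcd
--
-- def sum_of_divisors_with_conditions(number):
--     # Считаем сумму
--     digit_sum = sum(int(digit) for digit in str(number))
--
--     # Считаем произведение
--     digit_product = 1
--     for digit in str(number):
--         digit_product *= int(digit)
--
--     # сумма делителей
--     divisor_sum = 0
--
--     for i in range(1, number + 1):
--         # проверяем, является ли текущее число делителем number
--         if number % i == 0:
--             # Проверяем условия взаимной простоты и добавляем число к сумме делителей, если условия выполняются
--             if gcd(i, digit_sum) == 1 and gcd(i, digit_product) != 1: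
--                 divisor_sum += i
--
--     return divisor_sum
-- ===== SOURCE B (Python) =====
-- from math import gcd, isqrt
--
-- def sum_of_divisors_with_conditions(number):
--     digit_sum = sum(int(d) for d in str(number))
--     digit_product = 1
--     for d in str(number):
--         digit_product *= int(d)
--
--     def ok(d):
--         return gcd(d, digit_sum) == 1 and gcd(d, digit_product) != 1
--
--     total = 0
--     # enumerate divisors in pairs (i, number // i) with i up to isqrt(number)
--     for i in range(1, isqrt(number) + 1):
--         if number % i == 0:
--             j = number // i
--             if ok(i):
--                 total += i
--             if j != i and ok(j):
--                 total += j
--     return total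
-- ===== Notes on version B (the rewrite author's own statement) =====
-- stated objective: faster
-- what changed: B enumerates divisors in pairs (i, number//i) for i up to isqrt(number) instead of testing every integer from 1 to number.
import Mathlib
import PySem

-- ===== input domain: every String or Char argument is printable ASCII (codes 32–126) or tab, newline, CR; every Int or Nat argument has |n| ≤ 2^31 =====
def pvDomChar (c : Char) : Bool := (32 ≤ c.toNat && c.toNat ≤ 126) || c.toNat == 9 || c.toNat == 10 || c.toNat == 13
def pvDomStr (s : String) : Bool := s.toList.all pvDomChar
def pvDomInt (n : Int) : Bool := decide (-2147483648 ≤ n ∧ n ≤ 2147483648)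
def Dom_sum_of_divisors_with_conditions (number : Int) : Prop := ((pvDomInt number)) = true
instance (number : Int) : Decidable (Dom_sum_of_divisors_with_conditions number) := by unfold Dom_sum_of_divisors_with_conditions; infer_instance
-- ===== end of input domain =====

-- B replaces A's scan of every integer 1..number by enumeration of divisor pairs (i, number // i)
-- for i up to isqrt(number); a timing run measures whether that is faster on the generated inputs.

-- ===== PORT A =====
-- int(digit) for a one-character string; the `.getD 0` branch is unreachable under
-- Pre_ (number ≥ 0, so every character of str(number) is a decimal digit).
def pvDig (c : Char) : Int := (PySem.Int.ofStr? (String.ofList [c])).getD 0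

-- digit_sum = sum(int(digit) for digit in str(number))
def pvDigitSum (number : Int) : Int := ((PySem.Int.toChars number).map pvDig).sum

-- digit_product: for digit in str(number): digit_product *= int(digit)
def pvDigitProd (number : Int) : Int :=
  (PySem.Int.toChars number).foldl (fun acc c => acc * pvDig c) 1

def sum_of_divisors_with_conditions (number : Int) : Int :=
  let digit_sum := pvDigitSum number
  let digit_product := pvDigitProd number
  (PySem.List.pyRange 1 (number + 1) 1).foldl
    (fun divisor_sum i =>
      if PySem.Int.mod number i == 0 then
        if Int.gcd i digit_sum == 1 && Int.gcd i digit_product != 1 then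
          divisor_sum + i
        else divisor_sum
      else divisor_sum) 0

-- ===== PORT B =====
-- ok(d) = gcd(d, digit_sum) == 1 and gcd(d, digit_product) != 1
def pvOk (digit_sum digit_product d : Int) : Bool :=
  Int.gcd d digit_sum == 1 && Int.gcd d digit_product != 1

def sum_of_divisors_with_conditions_alt (number : Int) : Int :=
  let digit_sum := pvDigitSum number
  let digit_product := pvDigitProd number
  -- range(1, isqrt(number) + 1); math.isqrt = Nat.sqrt on the nonneg numbers Pre_ admits
  (PySem.List.pyRange 1 ((Nat.sqrt number.toNat : Int) + 1) 1).foldl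
    (fun total i =>
      if PySem.Int.mod number i == 0 then
        let j := PySem.Int.floordiv number i
        let total := if pvOk digit_sum digit_product i then total + i else total
        if j != i && pvOk digit_sum digit_product j then total + j else total
      else total) 0

-- ===== PRECONDITION & SPEC =====
-- Pre_ excludes negative numbers: there A (and B) raise ValueError, from int('-') applied to
-- the sign character of str(number).
def Pre_sum_of_divisors_with_conditions (number : Int) : Prop := 0 ≤ number
instance (number : Int) : Decidable (Pre_sum_of_divisors_with_conditions number) := by
  unfold Pre_sum_of_divisors_with_conditions; infer_instance

def pvWitness_sum_of_divisors_with_conditions : Int := 12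

def Spec_sum_of_divisors_with_conditions (number : Int) (out : Int) : Prop := out = sum_of_divisors_with_conditions_alt number
instance (number : Int) (out : Int) : Decidable (Spec_sum_of_divisors_with_conditions number out) := by unfold Spec_sum_of_divisors_with_conditions; infer_instance

-- ===== CLAIM (what is proved, stated in full; the proofs are below) =====
def Claim_equal_sum_of_divisors_with_conditions : Prop := ∀ (number : Int), Dom_sum_of_divisors_with_conditions number → Pre_sum_of_divisors_with_conditions number → Spec_sum_of_divisors_with_conditions number (sum_of_divisors_with_conditions number)

-- ===== LEMMAS AND PROOFS =====

theorem pvFoldlAdd (step : Int → Int → Int) (g : Int → Int)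
    (h : ∀ s i, step s i = s + g i) :
    ∀ (l : List Int) (init : Int), l.foldl step init = init + (l.map g).sum := by
  intro l
  induction l with
  | nil => intro init; simp
  | cons x xs ih => intro init; simp [List.foldl, h, ih, add_assoc]

theorem pvSumListRange (f : ℕ → Int) :
    ∀ n : ℕ, ((List.range n).map f).sum = ∑ i ∈ Finset.range n, f i := by
  intro n
  induction n with
  | zero => simp
  | succ m ih => simp [List.range_succ, Finset.sum_range_succ, ih]

theorem pvKey (N : ℕ) (f : ℕ → Int) :
    ∑ d ∈ Finset.Ico 1 (Nat.sqrt N + 1),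
      (if d ∣ N then (f d + if N / d ≠ d then f (N / d) else 0) else 0)
    = ∑ d ∈ Finset.Ico 1 (N + 1), (if d ∣ N then f d else 0) := by
  rcases Nat.eq_zero_or_pos N with h0 | hN
  · subst h0; simp
  have hN0 : N ≠ 0 := by omega
  have hR : ∑ d ∈ Finset.Ico 1 (N + 1), (if d ∣ N then f d else 0)
      = ∑ d ∈ N.divisors, f d := by
    rw [show N.divisors = Finset.filter (· ∣ N) (Finset.Ico 1 (N+1)) from rfl,
      Finset.sum_filter]
  have hLset : Finset.filter (· ∣ N) (Finset.Ico 1 (Nat.sqrt N + 1))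
      = Finset.filter (fun d => d * d ≤ N) N.divisors := by
    ext d
    simp only [Finset.mem_filter, Finset.mem_Ico, Nat.mem_divisors]
    constructor
    · rintro ⟨⟨h1, h2⟩, hd⟩
      exact ⟨⟨hd, hN0⟩, Nat.le_sqrt.mp (Nat.lt_succ_iff.mp h2)⟩
    · rintro ⟨⟨hd, _⟩, hle⟩
      exact ⟨⟨(Nat.pos_of_dvd_of_pos hd hN), Nat.lt_succ_iff.mpr (Nat.le_sqrt.mpr hle)⟩, hd⟩
  have hL : ∑ d ∈ Finset.Ico 1 (Nat.sqrt N + 1),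
      (if d ∣ N then (f d + if N / d ≠ d then f (N / d) else 0) else 0)
      = ∑ d ∈ Finset.filter (fun d => d * d ≤ N) N.divisors,
          (f d + if N / d ≠ d then f (N / d) else 0) := by
    rw [← Finset.sum_filter, hLset]
  rw [hL, hR, Finset.sum_add_distrib]
  have hiff : ∀ d ∈ Finset.filter (fun d => d * d ≤ N) N.divisors,
      ((if N / d ≠ d then f (N / d) else 0) = if d * d < N then f (N / d) else 0) := by
    intro d hd
    simp only [Finset.mem_filter, Nat.mem_divisors] at hd
    obtain ⟨⟨hdvd, _⟩, hle⟩ := hd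
    have hdpos : 0 < d := Nat.pos_of_dvd_of_pos hdvd hN
    have key : N / d = d ↔ d * d = N := by
      constructor
      · intro h
        have hmul : d * (N / d) = N := Nat.mul_div_cancel' hdvd
        rw [h] at hmul; exact hmul
      · intro h; rw [← h, Nat.mul_div_cancel_left _ hdpos]
    by_cases hlt : d * d < N
    · rw [if_pos hlt, if_pos (fun h => absurd (key.mp h) (by omega))]
    · have heq : d * d = N := le_antisymm hle (le_of_not_gt hlt)
      rw [if_neg hlt, if_neg (by simp [key, heq])]
  rw [Finset.sum_congr rfl hiff, ← Finset.sum_filter]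
  have hfilter2 : Finset.filter (fun d => d * d < N) (Finset.filter (fun d => d * d ≤ N) N.divisors)
      = Finset.filter (fun d => d * d < N) N.divisors := by
    rw [Finset.filter_filter]
    apply Finset.filter_congr
    intro d _
    constructor
    · rintro ⟨_, h⟩; exact h
    · intro h; exact ⟨le_of_lt h, h⟩
  rw [hfilter2]
  have hbij : ∑ d ∈ Finset.filter (fun d => d * d < N) N.divisors, f (N / d)
      = ∑ e ∈ Finset.filter (fun e => N < e * e) N.divisors, f e := by
    refine Finset.sum_nbij' (fun d => N / d) (fun e => N / e) ?_ ?_ ?_ ?_ ?_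
    · intro d hd
      simp only [Finset.mem_filter, Nat.mem_divisors] at hd ⊢
      obtain ⟨⟨hdvd, _⟩, hlt⟩ := hd
      have hdpos : 0 < d := Nat.pos_of_dvd_of_pos hdvd hN
      refine ⟨⟨Nat.div_dvd_of_dvd hdvd, hN0⟩, ?_⟩
      have hmul : d * (N / d) = N := Nat.mul_div_cancel' hdvd
      have hqpos : 0 < N / d := Nat.pos_of_dvd_of_pos (Nat.div_dvd_of_dvd hdvd) hN
      nlinarith
    · intro e he
      simp only [Finset.mem_filter, Nat.mem_divisors] at he ⊢
      obtain ⟨⟨hdvd, _⟩, hgt⟩ := he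
      have hepos : 0 < e := Nat.pos_of_dvd_of_pos hdvd hN
      refine ⟨⟨Nat.div_dvd_of_dvd hdvd, hN0⟩, ?_⟩
      have hmul : e * (N / e) = N := Nat.mul_div_cancel' hdvd
      have hqpos : 0 < N / e := Nat.pos_of_dvd_of_pos (Nat.div_dvd_of_dvd hdvd) hN
      nlinarith
    · intro d hd
      simp only [Finset.mem_filter, Nat.mem_divisors] at hd
      exact Nat.div_div_self hd.1.1 hN0
    · intro e he
      simp only [Finset.mem_filter, Nat.mem_divisors] at he
      exact Nat.div_div_self he.1.1 hN0
    · intro d _; rfl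
  have hnot : Finset.filter (fun e => N < e * e) N.divisors
      = Finset.filter (fun e => ¬ e * e ≤ N) N.divisors :=
    Finset.filter_congr (fun e _ => not_le.symm)
  rw [hbij, hnot, Finset.sum_filter_add_sum_filter_not N.divisors (fun d => d * d ≤ N)]

theorem pvMain (number : Int) (hpre : 0 ≤ number) :
    sum_of_divisors_with_conditions number = sum_of_divisors_with_conditions_alt number := by
  lift number to ℕ using hpre with N
  simp only [sum_of_divisors_with_conditions, sum_of_divisors_with_conditions_alt,
    Int.toNat_natCast]
  set ds := pvDigitSum (N : Int) with hds
  set dp := pvDigitProd (N : Int) with hdp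
  set f : ℕ → Int := fun e => if pvOk ds dp (e : Int) then (e : Int) else 0 with hf
  have hA : (PySem.List.pyRange 1 ((N : Int) + 1) 1).foldl
      (fun divisor_sum i =>
        if PySem.Int.mod (N : Int) i == 0 then
          if Int.gcd i ds == 1 && Int.gcd i dp != 1 then divisor_sum + i else divisor_sum
        else divisor_sum) 0
      = ∑ d ∈ Finset.Ico 1 (N + 1), (if d ∣ N then f d else 0) := by
    rw [pvFoldlAdd _ (fun i => if PySem.Int.mod (N : Int) i == 0 then
          (if pvOk ds dp i then i else 0) else 0)
        (by intro s i; simp only [pvOk]; split_ifs <;> omega)]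
    rw [PySem.List.pyRange_one, List.map_map]
    have hcnt : ((N : Int) + 1 - 1).toNat = N := by omega
    rw [hcnt, pvSumListRange, Finset.sum_Ico_eq_sum_range]
    simp only [Nat.add_sub_cancel, zero_add]
    apply Finset.sum_congr rfl
    intro k _
    simp only [Function.comp]
    have h1 : ((1 : Int) + (k : Int)) = ((1 + k : ℕ) : Int) := by push_cast; ring
    rw [h1, PySem.Int.mod_natCast]
    by_cases hdvd : (1 + k) ∣ N
    · have h3 : N % (1 + k) = 0 := Nat.mod_eq_zero_of_dvd hdvd
      simp [h3, hdvd, hf]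
    · have h3 : N % (1 + k) ≠ 0 := fun h => hdvd (Nat.dvd_of_mod_eq_zero h)
      have h4 : ¬ (((1 : Int) + ↑k) ∣ (N : Int)) := by rw [h1]; exact_mod_cast hdvd
      simp [hdvd, h4]
  have hB : (PySem.List.pyRange 1 ((Nat.sqrt N : Int) + 1) 1).foldl
      (fun total i =>
        if PySem.Int.mod (N : Int) i == 0 then
          let j := PySem.Int.floordiv (N : Int) i
          let total' := if pvOk ds dp i then total + i else total
          if j != i && pvOk ds dp j then total' + j else total'
        else total) 0
      = ∑ d ∈ Finset.Ico 1 (Nat.sqrt N + 1),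
          (if d ∣ N then (f d + if N / d ≠ d then f (N / d) else 0) else 0) := by
    rw [pvFoldlAdd _ (fun i => if PySem.Int.mod (N : Int) i == 0 then
          ((if pvOk ds dp i then i else 0) +
           (if PySem.Int.floordiv (N : Int) i != i && pvOk ds dp (PySem.Int.floordiv (N : Int) i)
            then PySem.Int.floordiv (N : Int) i else 0)) else 0)
        (by intro s i; simp only [pvOk]; split_ifs <;> omega)]
    rw [PySem.List.pyRange_one, List.map_map]
    have hcnt : ((Nat.sqrt N : Int) + 1 - 1).toNat = Nat.sqrt N := by omega
    rw [hcnt, pvSumListRange, Finset.sum_Ico_eq_sum_range]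
    simp only [Nat.add_sub_cancel, zero_add]
    apply Finset.sum_congr rfl
    intro k _
    simp only [Function.comp]
    have h1 : ((1 : Int) + (k : Int)) = ((1 + k : ℕ) : Int) := by push_cast; ring
    rw [h1, PySem.Int.mod_natCast, PySem.Int.floordiv_natCast]
    by_cases hdvd : (1 + k) ∣ N
    · have h3 : N % (1 + k) = 0 := Nat.mod_eq_zero_of_dvd hdvd
      have hcast : ((N : Int) / ((1 : Int) + ↑k)) = ((N / (1 + k) : ℕ) : Int) := by
        rw [h1, ← Int.natCast_div]
      by_cases hne : N / (1 + k) ≠ (1 + k)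
      · have hne' : ¬ ((N : Int) / ((1 : Int) + ↑k) = 1 + ↑k) := by
          rw [hcast, h1]; exact_mod_cast hne
        simp [h3, hdvd, hne, hne', hf]
      · simp only [ne_eq, not_not] at hne
        have hne' : ((N : Int) / ((1 : Int) + ↑k) = 1 + ↑k) := by
          rw [hcast, h1]; exact_mod_cast hne
        simp [h3, hdvd, hne, hf]
    · have h3 : N % (1 + k) ≠ 0 := fun h => hdvd (Nat.dvd_of_mod_eq_zero h)
      have h4 : ¬ (((1 : Int) + ↑k) ∣ (N : Int)) := by rw [h1]; exact_mod_cast hdvd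
      simp [hdvd, h4]
  rw [hA, hB, pvKey]

-- ===== VERDICT (by name: the statement is the Claim_ definition above) =====
theorem sum_of_divisors_with_conditions_spec : Claim_equal_sum_of_divisors_with_conditions := by
  intro number _ hpre
  unfold Spec_sum_of_divisors_with_conditions
  exact pvMain number hpre
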